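-- pv_equiv track=rewrite | github.com/huacre1997/kwema_challenge | utils/base.py | calculate_bacteria
-- ===== SOURCE A (Python) =====
-- def calculate_bacteria(days, maturation_period, life_expectancy, reproduction_rate):
--     # Definición de la función "calculate_bacteria" con los parámetros requeridos.
--
--     initial_bacteria = [2, 3, 3, 1, 2] # Inicializar bacterias iniciales
--     for _ in range(days):  # Bucle que se ejecuta "days" veces.
--         counter = initial_bacteria.count(0)  # Contador de bacterias con contador interno con valor 0.
--         for index,bc in enumerate(initial_bacteria):
--             if bc > 0:
--                 # Si la bacteria es diferente a 0, la resta 1.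
--                 initial_bacteria[index]-=1
--             else:
--                 # Reemplaza el valor de 0 por la esperanza de vida de la bacteria.
--                 initial_bacteria[index]=life_expectancy
--         if counter != 0:
--             # Agregar nuevas bacterias maduras a la lista, según el periodo de maduración, la tasa de reproducción y el valor de counter.
--             initial_bacteria.extend([maturation_period] * counter * reproduction_rate)
--
--     return len(initial_bacteria)
-- ===== SOURCE B (Python) =====
-- def calculate_bacteria(days, maturation_period, life_expectancy, reproduction_rate):
--     # Lanternfish-style bucket counting: track how many bacteria share each
--     # internal-timer value instead of one list entry per bacterium.
--     counts = {2: 2, 3: 2, 1: 1}  # multiset of [2, 3, 3, 1, 2]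
--     for _ in range(days):
--         zeros = counts.get(0, 0)
--         new = {}
--         for v, c in counts.items():
--             key = v - 1 if v > 0 else life_expectancy
--             new[key] = new.get(key, 0) + c
--         born = zeros * reproduction_rate
--         if born > 0:
--             new[maturation_period] = new.get(maturation_period, 0) + born
--         counts = new
--     return sum(counts.values())
-- ===== Notes on version B (the rewrite author's own statement) =====
-- stated objective: faster
-- what changed: B replaces the per-bacterium list simulation with lanternfish-style bucket counting: a dict mapping each internal-timer value to how many bacteria share it, updated once per day, summing the counts at the end.
import Mathlib
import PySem

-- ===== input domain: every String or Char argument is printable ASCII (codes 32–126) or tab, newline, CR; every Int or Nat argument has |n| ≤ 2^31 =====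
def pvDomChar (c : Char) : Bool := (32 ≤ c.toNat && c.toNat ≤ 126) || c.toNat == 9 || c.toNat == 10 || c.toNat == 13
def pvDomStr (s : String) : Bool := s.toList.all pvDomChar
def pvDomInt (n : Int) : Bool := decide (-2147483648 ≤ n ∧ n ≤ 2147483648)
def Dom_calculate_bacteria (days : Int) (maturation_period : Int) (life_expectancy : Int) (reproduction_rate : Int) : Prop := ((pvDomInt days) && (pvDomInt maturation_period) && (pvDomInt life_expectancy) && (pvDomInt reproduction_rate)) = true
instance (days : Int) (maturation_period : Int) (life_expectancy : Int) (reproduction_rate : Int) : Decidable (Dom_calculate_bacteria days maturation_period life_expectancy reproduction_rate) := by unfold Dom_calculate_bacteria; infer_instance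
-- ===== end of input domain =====

-- ===== PORT A =====
def calculate_bacteria (days : Int) (maturation_period : Int) (life_expectancy : Int) (reproduction_rate : Int) : Int :=
  let final := (PySem.List.pyRange 0 days 1).foldl
    (fun initial_bacteria _ =>
      let counter := initial_bacteria.count 0
      -- 'for index,bc in enumerate(...)' mutates only the current index: an
      -- element-wise in-place rewrite, ported as List.map in the same order
      let updated := initial_bacteria.map (fun bc => if bc > 0 then bc - 1 else life_expectancy)
      if counter ≠ 0 then
        updated ++ PySem.List.pyRepeat (PySem.List.pyRepeat [maturation_period] (counter : Int)) reproduction_rate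
      else updated)
    [2, 3, 3, 1, 2]
  (final.length : Int)

-- ===== PORT B =====
-- One day of the bucket simulation: rebuild the timer→count dict, then add newborns.
def pvDayB (maturation_period : Int) (life_expectancy : Int) (reproduction_rate : Int)
    (counts : PySem.Dict Int Int) : PySem.Dict Int Int :=
  let zeros := counts.getD 0 0
  let new := counts.items.foldl
    (fun new p =>
      let key := if p.1 > 0 then p.1 - 1 else life_expectancy
      new.insert key (new.getD key 0 + p.2))
    PySem.Dict.empty
  let born := zeros * reproduction_rate
  if born > 0 then new.insert maturation_period (new.getD maturation_period 0 + born) else new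

def calculate_bacteria_alt (days : Int) (maturation_period : Int) (life_expectancy : Int) (reproduction_rate : Int) : Int :=
  let final := (PySem.List.pyRange 0 days 1).foldl
    (fun counts _ => pvDayB maturation_period life_expectancy reproduction_rate counts)
    (PySem.Dict.ofList [(2, 2), (3, 2), (1, 1)])
  final.values.foldl (fun acc v => acc + v) 0


-- ===== PRECONDITION & SPEC =====
def Spec_calculate_bacteria (days : Int) (maturation_period : Int) (life_expectancy : Int) (reproduction_rate : Int) (out : Int) : Prop := out = calculate_bacteria_alt days maturation_period life_expectancy reproduction_rate
instance (days : Int) (maturation_period : Int) (life_expectancy : Int) (reproduction_rate : Int) (out : Int) : Decidable (Spec_calculate_bacteria days maturation_period life_expectancy reproduction_rate out) := by unfold Spec_calculate_bacteria; infer_instance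

-- B counts bacteria per internal-timer value in a dict (lanternfish buckets) instead of
-- simulating one list entry per bacterium; same result, exponentially smaller state.

-- ===== CLAIM (what is proved, stated in full; the proofs are below) =====
def Claim_equal_calculate_bacteria : Prop := ∀ (days : Int) (maturation_period : Int) (life_expectancy : Int) (reproduction_rate : Int), Dom_calculate_bacteria days maturation_period life_expectancy reproduction_rate → Spec_calculate_bacteria days maturation_period life_expectancy reproduction_rate (calculate_bacteria days maturation_period life_expectancy reproduction_rate)

-- ===== LEMMAS AND PROOFS =====

-- A fold that ignores the list elements is function iteration.
theorem pv_foldl_const {α β : Type} (F : α → α) : ∀ (l : List β) (init : α),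
    l.foldl (fun s _ => F s) init = F^[l.length] init := by
  intro l
  induction l with
  | nil => intro init; rfl
  | cons x xs ih =>
    intro init
    simp only [List.foldl_cons, List.length_cons, Function.iterate_succ_apply]
    exact ih (F init)

theorem pv_foldl_ins_getD (g : Int → Int) :
    ∀ (items : List (Int × Int)) (nd : PySem.Dict Int Int) (v : Int),
    (items.foldl (fun nd p => nd.insert (g p.1) (nd.getD (g p.1) 0 + p.2)) nd).getD v 0
      = nd.getD v 0 + (items.map (fun p => if g p.1 = v then p.2 else 0)).sum := by
  intro items
  induction items with
  | nil => intro nd v; simp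
  | cons p rest ih =>
    intro nd v
    simp only [List.foldl_cons, List.map_cons, List.sum_cons]
    rw [ih]
    rw [PySem.Dict.getD_insert]
    by_cases h : v = g p.1
    · simp [h]; ring
    · simp [h, Ne.symm h]

-- key bridge: a nodup key list covering lst turns a per-key weighted sum into a count of the image
theorem pv_sum_one (g : Int → Int) (v x : Int) :
    ∀ (K : List Int), K.Nodup → x ∈ K →
    (K.map (fun k => if g k = v ∧ k = x then (1 : Int) else 0)).sum
      = if g x = v then (1 : Int) else 0 := by
  intro K
  induction K with
  | nil => intro _ hx; cases hx
  | cons a as ih =>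
    intro hnd hx
    simp only [List.map_cons, List.sum_cons]
    rcases List.mem_cons.mp hx with h | h
    · subst h
      have hz : (as.map (fun k => if g k = v ∧ k = x then (1 : Int) else 0)).sum = 0 := by
        apply List.sum_eq_zero
        intro y hy
        rcases List.mem_map.mp hy with ⟨k, hk, rfl⟩
        have : k ≠ x := fun he => (List.nodup_cons.mp hnd).1 (he ▸ hk)
        simp [this]
      rw [hz]
      by_cases hg : g x = v
      · simp [hg]
      · simp [hg]
    · have ha : a ≠ x := fun he => (List.nodup_cons.mp hnd).1 (he ▸ h)
      rw [ih (List.nodup_cons.mp hnd).2 h]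
      simp [ha]

theorem pv_sum_count (g : Int → Int) (v : Int) :
    ∀ (lst : List Int) (K : List Int), K.Nodup → (∀ x ∈ lst, x ∈ K) →
    (K.map (fun k => if g k = v then (lst.count k : Int) else 0)).sum
      = ((lst.map g).count v : Int) := by
  intro lst
  induction lst with
  | nil => intro K _ _; simp
  | cons x xs ih =>
    intro K hnd hcov
    have hsplit : ∀ k : Int,
        (if g k = v then (((x :: xs).count k : Nat) : Int) else 0)
          = (if g k = v then ((xs.count k : Nat) : Int) else 0)
            + (if g k = v ∧ k = x then (1 : Int) else 0) := by
      intro k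
      by_cases hk : k = x
      · subst hk
        by_cases hg : g k = v
        · simp only [hg, if_pos, and_self, if_true, List.count_cons_self]
          push_cast; ring
        · simp [hg]
      · have hk' : x ≠ k := fun h => hk h.symm
        simp [List.count_cons, hk, hk']
    calc (K.map (fun k => if g k = v then (((x :: xs).count k : Nat) : Int) else 0)).sum
        = (K.map (fun k =>
            (if g k = v then ((xs.count k : Nat) : Int) else 0)
              + (if g k = v ∧ k = x then (1 : Int) else 0))).sum := by
          congr 1; exact List.map_congr_left (fun k _ => hsplit k)
      _ = (K.map (fun k => if g k = v then ((xs.count k : Nat) : Int) else 0)).sum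
            + (K.map (fun k => if g k = v ∧ k = x then (1 : Int) else 0)).sum := by
          rw [← List.sum_map_add]
      _ = ((xs.map g).count v : Int) + (if g x = v then (1 : Int) else 0) := by
          rw [ih K hnd (fun y hy => hcov y (List.mem_cons_of_mem _ hy)),
              pv_sum_one g v x K hnd (hcov x (List.mem_cons_self))]
      _ = (((x :: xs).map g).count v : Int) := by
          simp only [List.map_cons]
          by_cases hg : g x = v
          · rw [if_pos hg, List.count_cons]
            push_cast
            simp [hg]
          · rw [if_neg hg, List.count_cons]
            simp [hg]

-- the running invariant
def pvInv (lst : List Int) (d : PySem.Dict Int Int) : Prop :=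
  d.keys.Nodup ∧ ∀ v : Int, d.getD v 0 = (lst.count v : Int)

theorem pv_cover {lst : List Int} {d : PySem.Dict Int Int} (h : pvInv lst d) :
    ∀ x ∈ lst, x ∈ d.keys := by
  intro x hx
  by_contra hmem
  have hc : d.contains x = false := by
    by_cases hb : d.contains x = true
    · exact absurd ((PySem.Dict.contains_iff_mem_keys d x).mp hb) hmem
    · simpa using hb
  have h0 : d.getD x 0 = 0 := PySem.Dict.getD_of_not_contains d 0 hc
  have := h.2 x
  rw [h0] at this
  have hpos : 0 < lst.count x := List.count_pos_iff.mpr hx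
  omega

-- the A-side day step, named (definitionally the lambda in the port of A)
def pvStepAFn (m L r : Int) (lst : List Int) : List Int :=
  let counter : Int := (lst.count 0 : Int)
  let updated := lst.map (fun bc => if bc > 0 then bc - 1 else L)
  if counter ≠ 0 then
    updated ++ PySem.List.pyRepeat (PySem.List.pyRepeat [m] counter) r
  else updated

theorem pv_step (m L r : Int) {lst : List Int} {d : PySem.Dict Int Int} (h : pvInv lst d) :
    pvInv (pvStepAFn m L r lst) (pvDayB m L r d) := by
  obtain ⟨hnd, hcnt⟩ := h
  set g : Int → Int := fun bc => if bc > 0 then bc - 1 else L with hg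
  have hrep : PySem.List.pyRepeat (PySem.List.pyRepeat [m] ((lst.count 0 : Nat) : Int)) r
      = List.replicate ((((lst.count 0 : Nat) : Int) * r).toNat) m := by
    rw [PySem.List.pyRepeat_singleton]
    show (List.replicate r.toNat (List.replicate ((lst.count 0 : Nat):Int).toNat m)).flatten = _
    rw [List.flatten_replicate_replicate]
    congr 1
    by_cases hr : r ≤ 0
    · have h1 : r.toNat = 0 := Int.toNat_of_nonpos hr
      have h2 : (((lst.count 0 : Nat) : Int) * r).toNat = 0 := by
        apply Int.toNat_of_nonpos
        exact mul_nonpos_of_nonneg_of_nonpos (by positivity) hr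
      simp [h1, h2]
    · have hr' : 0 < r := by omega
      have hcast : ((r.toNat * lst.count 0 : Nat) : Int)
          = (((((lst.count 0 : Nat) : Int) * r).toNat : Nat) : Int) := by
        push_cast
        rw [Int.toNat_of_nonneg (le_of_lt hr'), Int.toNat_of_nonneg (by positivity)]
        ring
      exact_mod_cast hcast
  -- count in the A-step result
  have hAcount : ∀ v : Int,
      ((pvStepAFn m L r lst).count v : Int)
      = ((lst.map g).count v : Int)
        + (if v = m then ((((lst.count 0 : Nat) : Int) * r).toNat : Int) else 0) := by
    intro v
    show ((if ((lst.count 0 : Nat) : Int) ≠ 0 then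
        lst.map (fun bc => if bc > 0 then bc - 1 else L) ++
          PySem.List.pyRepeat (PySem.List.pyRepeat [m] ((lst.count 0 : Nat) : Int)) r
      else lst.map (fun bc => if bc > 0 then bc - 1 else L)).count v : Int) = _
    by_cases hc : ((lst.count 0 : Nat) : Int) ≠ 0
    · rw [if_pos hc, List.count_append, hrep, ← hg, List.count_replicate]
      push_cast
      by_cases hv : v = m
      · subst hv; simp
      · have hv' : m ≠ v := fun h => hv h.symm
        simp [hv, hv']
    · rw [if_neg hc, ← hg]
      push_neg at hc
      have hz0 : ((((lst.count 0 : Nat) : Int) * r).toNat : Int) = 0 := by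
        rw [hc]; simp
      rw [hz0]
      simp
  -- getD in the B-step result
  have hnd2 : (d.items.foldl
      (fun nd p => nd.insert (if p.1 > 0 then p.1 - 1 else L) (nd.getD (if p.1 > 0 then p.1 - 1 else L) 0 + p.2))
      PySem.Dict.empty).keys.Nodup := by
    exact PySem.Dict.nodup_keys_foldl_insert_key d.items (fun p => if p.1 > 0 then p.1 - 1 else L) _ _ PySem.Dict.nodup_keys_empty
  have hmid : ∀ v : Int,
      (d.items.foldl
        (fun nd p => nd.insert (if p.1 > 0 then p.1 - 1 else L) (nd.getD (if p.1 > 0 then p.1 - 1 else L) 0 + p.2))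
        PySem.Dict.empty).getD v 0 = ((lst.map g).count v : Int) := by
    intro v
    rw [pv_foldl_ins_getD g d.items PySem.Dict.empty v]
    rw [PySem.Dict.items_eq_map_keys d hnd 0, List.map_map]
    have hterm : ((fun p : Int × Int => if g p.1 = v then p.2 else 0) ∘ fun k => (k, d.getD k 0))
        = fun k => if g k = v then (lst.count k : Int) else 0 := by
      funext k
      simp [Function.comp, hcnt k]
    rw [hterm, pv_sum_count g v lst d.keys hnd (pv_cover ⟨hnd, hcnt⟩)]
    simp [PySem.Dict.getD_empty]
  constructor
  · unfold pvDayB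
    simp only []
    split
    · exact PySem.Dict.nodup_keys_insert _ _ _ hnd2
    · exact hnd2
  · intro v
    rw [hAcount v]
    unfold pvDayB
    simp only []
    have hz : d.getD 0 0 = ((lst.count 0 : Nat) : Int) := hcnt 0
    by_cases hb : d.getD 0 0 * r > 0
    · rw [if_pos hb, PySem.Dict.getD_insert]
      by_cases hv : v = m
      · rw [if_pos hv, if_pos hv, hmid m]
        rw [hz] at hb ⊢
        have : ((((lst.count 0 : Nat) : Int) * r).toNat : Int) = ((lst.count 0 : Nat) : Int) * r := by
          omega
        rw [this]
        subst hv; ring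
      · rw [if_neg hv, if_neg hv, hmid v]; ring
    · rw [if_neg hb, hmid v]
      rw [hz] at hb
      have : ((((lst.count 0 : Nat) : Int) * r).toNat : Int) = 0 := by omega
      rw [this]
      simp

theorem pv_inv_init :
    pvInv [2, 3, 3, 1, 2] (PySem.Dict.ofList [(2, 2), (3, 2), (1, 1)]) := by
  have h : (PySem.Dict.ofList [(2, 2), (3, 2), (1, 1)] : PySem.Dict Int Int)
      = PySem.Dict.counter [2, 3, 3, 1, 2] := by decide
  constructor
  · rw [h]; exact PySem.Dict.nodup_keys_counter _
  · intro v; rw [h, PySem.Dict.getD_counter]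

theorem pv_iter (m L r : Int) : ∀ (n : Nat),
    pvInv ((pvStepAFn m L r)^[n] [2, 3, 3, 1, 2])
      ((pvDayB m L r)^[n] (PySem.Dict.ofList [(2, 2), (3, 2), (1, 1)])) := by
  intro n
  induction n with
  | zero => exact pv_inv_init
  | succ k ih =>
    rw [Function.iterate_succ_apply', Function.iterate_succ_apply']
    exact pv_step m L r ih

theorem pv_final {lst : List Int} {d : PySem.Dict Int Int} (h : pvInv lst d) :
    d.values.foldl (fun acc v => acc + v) 0 = (lst.length : Int) := by
  obtain ⟨hnd, hcnt⟩ := h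
  rw [PySem.List.foldl_add d.values (fun v => v) 0]
  rw [PySem.Dict.values_eq_map_keys d hnd 0]
  rw [List.map_map]
  have hterm : ((fun v : Int => v) ∘ fun k => d.getD k 0)
      = fun k => if (fun _ : Int => (0 : Int)) k = 0 then (lst.count k : Int) else 0 := by
    funext k
    simp [Function.comp, hcnt k]
  rw [hterm, pv_sum_count (fun _ => 0) 0 lst d.keys hnd (pv_cover ⟨hnd, hcnt⟩)]
  rw [List.map_const', List.count_replicate]
  simp


-- ===== VERDICT (by name: the statement is the Claim_ definition above) =====
theorem calculate_bacteria_spec : Claim_equal_calculate_bacteria := by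
  intro days m L r _
  unfold Spec_calculate_bacteria calculate_bacteria calculate_bacteria_alt
  simp only []
  rw [pv_foldl_const, pv_foldl_const]
  rw [PySem.List.length_pyRange_one]
  exact (pv_final (pv_iter m L r (days - 0).toNat)).symm
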